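-- pv_equiv track=rewrite | github.com/KenKarrasch/Adventofcode | 2019/19-20-2.py | deadends
-- ===== SOURCE A (Python) =====
-- def deadends(w):
--     n = [[a[:] for a in g] for g in w]
--     szx = len(w)
--     szy = len(w[0])
--     done = False
--     line = ''
--     m = [[0,1],[0,-1],[1,0],[-1,0]]
--     while not done:
--       done = True
--       for x in range(szx-1):
--         for y in range(szy-1):
--           ct = 0
--           if n[x][y] == '.':
--            ct = 0
--            for d in m:
--             tx,ty = x+d[0],y+d[1]
--             if n[tx][ty] == '#':
--               ct += 1
--            if ct == 3:
--             n[x][y] = '#'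
--             done = False
--     return n
-- ===== SOURCE B (Python) =====
-- def deadends(w):
--     # Sweeps a maintained, shrinking worklist of the remaining '.' cells instead of
--     # rescanning the whole grid each pass (return value only; w is not mutated).
--     n = [list(g) for g in w]
--     szx = len(w)
--     szy = len(w[0])
--     m = ((0, 1), (0, -1), (1, 0), (-1, 0))
--     cand = [(x, y) for x in range(szx - 1) for y in range(szy - 1) if n[x][y] == '.']
--     while cand:
--         nxt = []
--         for x, y in cand:
--             ct = 0
--             for dx, dy in m:
--                 if n[x + dx][y + dy] == '#':
--                     ct += 1
--             if ct == 3: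
--                 n[x][y] = '#'
--             else:
--                 nxt.append((x, y))
--         if len(nxt) == len(cand):
--             break
--         cand = nxt
--     return n
-- ===== Notes on version B (the rewrite author's own statement) =====
-- stated objective: alternative
-- what changed: A rescans the entire grid on every pass until a pass changes nothing; B builds the row-major list of '.' cells in the scanned region once and then sweeps only a maintained, shrinking worklist of the still-unfilled cells, stopping when a sweep fills none of them.
import Mathlib
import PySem

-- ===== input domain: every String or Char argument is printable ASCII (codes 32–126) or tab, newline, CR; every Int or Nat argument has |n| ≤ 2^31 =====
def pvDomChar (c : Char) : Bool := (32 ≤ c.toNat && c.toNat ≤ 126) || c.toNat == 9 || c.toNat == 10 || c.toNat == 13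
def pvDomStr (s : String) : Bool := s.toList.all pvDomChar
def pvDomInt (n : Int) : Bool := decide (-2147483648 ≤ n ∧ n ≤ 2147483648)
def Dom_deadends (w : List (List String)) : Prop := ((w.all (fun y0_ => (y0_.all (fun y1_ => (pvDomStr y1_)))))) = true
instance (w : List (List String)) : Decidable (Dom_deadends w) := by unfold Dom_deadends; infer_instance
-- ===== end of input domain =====

-- B replaces A's repeated whole-grid sweeps by sweeps over a maintained, shrinking
-- worklist of the remaining '.' cells (objective: alternative algorithm; equivalence is
-- about the return value — the Python A copies its argument and mutates only the copy).

-- ===== PORT A =====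
-- shared cell accessors: both Pythons contain the very same indexing expressions
-- n[tx][ty] (Python indexing, negative = from the end) and the assignment n[x][y] = '#'
def pvCell (n : List (List String)) (tx ty : Int) : String :=
  PySem.List.pyGetD (PySem.List.pyGetD n tx []) ty ""

def pvSet (n : List (List String)) (x y : Int) (v : String) : List (List String) :=
  PySem.List.pySetD n x (PySem.List.pySetD (PySem.List.pyGetD n x []) y v)

def pvDirs : List (Int × Int) := [(0, 1), (0, -1), (1, 0), (-1, 0)]

-- ct = 0; for d in m: tx,ty = x+d[0],y+d[1]; if n[tx][ty] == '#': ct += 1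
def pvCt (n : List (List String)) (x y : Int) : Int :=
  pvDirs.foldl (fun ct d => if pvCell n (x + d.1) (y + d.2) == "#" then ct + 1 else ct) 0

-- loop body of A for one (x, y): state is (n, done)
def pvStepA (st : List (List String) × Bool) (x y : Int) : List (List String) × Bool :=
  if pvCell st.1 x y == "." then
    if pvCt st.1 x y == 3 then (pvSet st.1 x y "#", false) else st
  else st

-- one pass of A: for x in range(szx-1): for y in range(szy-1): …, starting from done = True
def pvSweepA (szx szy : Int) (n : List (List String)) : List (List String) × Bool :=
  (PySem.List.pyRange 0 (szx - 1) 1).foldl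
    (fun st x => (PySem.List.pyRange 0 (szy - 1) 1).foldl (fun st2 y => pvStepA st2 x y) st)
    (n, true)

-- ---- termination machinery for pvLoopA (cited in its decreasing_by) ----
def pvCountDots (n : List (List String)) : Nat := (n.map (fun r => r.count ".")).sum

def pvPairs (szx szy : Int) : List (Int × Int) :=
  (PySem.List.pyRange 0 (szx - 1) 1).flatMap
    (fun x => (PySem.List.pyRange 0 (szy - 1) 1).map (fun y => (x, y)))

def pvG (st : List (List String) × Bool) (q : Int × Int) : List (List String) × Bool :=
  pvStepA st q.1 q.2

lemma pvSweepA_eq_foldG (szx szy : Int) (n : List (List String)) :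
    pvSweepA szx szy n = (pvPairs szx szy).foldl pvG (n, true) := by
  simp only [pvSweepA, pvPairs, pvG, List.foldl_flatMap, List.foldl_map]

lemma pvSum_set_lt (l : List Nat) (i : Nat) (a : Nat) (h : i < l.length) (ha : a < l[i]) :
    (l.set i a).sum < l.sum := by
  conv_rhs => rw [← List.take_append_drop i l, ← List.getElem_cons_drop h]
  rw [List.set_eq_take_cons_drop a h]
  simp only [List.sum_append, List.sum_cons]
  omega

lemma pvCount_set_lt (l : List String) (j : Nat) (h : j < l.length) (hv : l[j] = ".") :
    (l.set j "#").count "." < l.count "." := by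
  conv_rhs => rw [← List.take_append_drop j l, ← List.getElem_cons_drop h]
  rw [List.set_eq_take_cons_drop _ h]
  simp only [List.count_append, List.count_cons, hv]
  simp

lemma pvCell_dot_spec (n : List (List String)) (x y : Int) (hx : 0 ≤ x) (hy : 0 ≤ y)
    (h : pvCell n x y = ".") (v : String) :
    ∃ (hk : x.toNat < n.length), ∃ (hj : y.toNat < (n[x.toNat]).length),
      n[x.toNat][y.toNat] = "." ∧
      pvSet n x y v = n.set x.toNat ((n[x.toNat]).set y.toNat v) := by
  simp only [pvCell, pvSet, PySem.List.pyGetD, PySem.List.pyGet?, PySem.List.pyIdx?,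
    PySem.List.pySetD, PySem.List.pySet?, hx, hy, if_pos] at h ⊢
  by_cases hk : x < (n.length : Int)
  · simp only [hk, if_pos, Option.bind] at h ⊢
    have hk' : x.toNat < n.length := by omega
    simp only [List.getElem?_eq_getElem hk', Option.getD_some] at h ⊢
    by_cases hj : y < ((n[x.toNat] : List String).length : Int)
    · have hj' : y.toNat < (n[x.toNat] : List String).length := by omega
      simp only [hj, if_pos, List.getElem?_eq_getElem hj', Option.getD_some] at h ⊢
      exact ⟨hk', hj', h, rfl⟩
    · simp [hj] at h
  · have h0 : ¬ (y < (0:Int)) := by omega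
    simp [hk, h0, Option.bind] at h

lemma pvSet_dot_count (n : List (List String)) (x y : Int) (hx : 0 ≤ x) (hy : 0 ≤ y)
    (h : pvCell n x y = ".") : pvCountDots (pvSet n x y "#") < pvCountDots n := by
  obtain ⟨hk, hj, hdot, hset⟩ := pvCell_dot_spec n x y hx hy h "#"
  rw [hset]
  unfold pvCountDots
  rw [List.map_set]
  exact pvSum_set_lt _ _ _ (by simpa using hk)
    (by simpa using pvCount_set_lt (n[x.toNat]) y.toNat hj hdot)

lemma pvStepA_cases (st : List (List String) × Bool) (x y : Int) (hx : 0 ≤ x) (hy : 0 ≤ y) :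
    pvStepA st x y = st ∨
      (pvCountDots (pvStepA st x y).1 < pvCountDots st.1 ∧ (pvStepA st x y).2 = false) := by
  unfold pvStepA
  split_ifs with h1 h2
  · exact Or.inr ⟨pvSet_dot_count st.1 x y hx hy (by simpa using h1), rfl⟩
  · exact Or.inl rfl
  · exact Or.inl rfl

lemma pvFoldA_progress (L : List (Int × Int)) :
    ∀ (n : List (List String)) (done : Bool), (∀ q ∈ L, 0 ≤ q.1 ∧ 0 ≤ q.2) →
    L.foldl pvG (n, done) = (n, done) ∨
      (pvCountDots (L.foldl pvG (n, done)).1 < pvCountDots n ∧ (L.foldl pvG (n, done)).2 = false) := by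
  induction L with
  | nil => intro n done _; exact Or.inl rfl
  | cons q L ih =>
    intro n done hnn
    have hq := hnn q (List.mem_cons_self ..)
    rw [List.foldl_cons]
    rcases pvStepA_cases (n, done) q.1 q.2 hq.1 hq.2 with heq | ⟨hlt, hfalse⟩
    · rw [show pvG (n, done) q = (n, done) from heq]
      exact ih n done (fun r hr => hnn r (List.mem_cons_of_mem _ hr))
    · have hst : pvG (n, done) q = ((pvStepA (n, done) q.1 q.2).1, false) := by
        rw [pvG]; exact Prod.ext rfl hfalse
      rw [hst]
      rcases ih _ false (fun r hr => hnn r (List.mem_cons_of_mem _ hr)) with heq2 | ⟨hlt2, hf2⟩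
      · rw [heq2]; exact Or.inr ⟨hlt, rfl⟩
      · exact Or.inr ⟨lt_trans hlt2 hlt, hf2⟩

lemma pvPairs_nonneg (szx szy : Int) : ∀ q ∈ pvPairs szx szy, 0 ≤ q.1 ∧ 0 ≤ q.2 := by
  intro q hq
  simp only [pvPairs, List.mem_flatMap, List.mem_map, PySem.List.mem_pyRange_one] at hq
  obtain ⟨x, hx, y, hy, rfl⟩ := hq
  exact ⟨hx.1, hy.1⟩

lemma pvSweep_progress (szx szy : Int) (n : List (List String))
    (h : (pvSweepA szx szy n).2 = false) :
    pvCountDots (pvSweepA szx szy n).1 < pvCountDots n := by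
  rw [pvSweepA_eq_foldG] at h ⊢
  rcases pvFoldA_progress (pvPairs szx szy) n true (pvPairs_nonneg szx szy) with heq | ⟨hlt, _⟩
  · rw [heq] at h; simp at h
  · exact hlt
-- ---- end termination machinery ----

-- while not done: done = True; <one full pass>; (return n when a pass reports done)
def pvLoopA (szx szy : Int) (n : List (List String)) : List (List String) :=
  if h : (pvSweepA szx szy n).2 = true then (pvSweepA szx szy n).1
  else pvLoopA szx szy (pvSweepA szx szy n).1
termination_by pvCountDots n
decreasing_by exact pvSweep_progress szx szy n (by simpa using h)

def deadends (w : List (List String)) : List (List String) :=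
  let n := w.map (fun g => g.map (fun a => a))
  let szx : Int := PySem.List.len w
  let szy : Int := PySem.List.len (PySem.List.pyGetD w 0 [])
  pvLoopA szx szy n

-- ===== PORT B =====
-- loop body of B for one worklist cell p: state is (n, nxt)
def pvStepB (st : List (List String) × List (Int × Int)) (p : Int × Int) :
    List (List String) × List (Int × Int) :=
  if pvCt st.1 p.1 p.2 == 3 then (pvSet st.1 p.1 p.2 "#", st.2)
  else (st.1, st.2 ++ [p])

-- termination lemma for pvLoopB (cited in its decreasing_by)
lemma pvFoldB_len_le (cand : List (Int × Int)) :
    ∀ (n : List (List String)) (acc : List (Int × Int)),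
      ((cand.foldl pvStepB (n, acc)).2).length ≤ acc.length + cand.length := by
  induction cand with
  | nil => simp
  | cons p L ih =>
    intro n acc
    simp only [List.foldl_cons, pvStepB]
    split_ifs with hct
    · have := ih (pvSet n p.1 p.2 "#") acc
      simp only [List.length_cons] at this ⊢
      omega
    · have := ih n (acc ++ [p])
      simp only [List.length_append, List.length_cons, List.length_nil] at this ⊢
      omega

-- while cand: nxt = []; <pass over cand>; if len(nxt) == len(cand): break; cand = nxt
def pvLoopB (n : List (List String)) (cand : List (Int × Int)) : List (List String) :=
  if cand.isEmpty then n
  else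
    if h : ((cand.foldl pvStepB (n, [])).2).length = cand.length then
      (cand.foldl pvStepB (n, [])).1
    else pvLoopB (cand.foldl pvStepB (n, [])).1 (cand.foldl pvStepB (n, [])).2
termination_by cand.length
decreasing_by
  have hle := pvFoldB_len_le cand n []
  simp only [List.length_nil, Nat.zero_add] at hle
  simp only [List.foldl_attach]
  omega

def deadends_alt (w : List (List String)) : List (List String) :=
  let n := w.map (fun g => g)
  let szx : Int := PySem.List.len w
  let szy : Int := PySem.List.len (PySem.List.pyGetD w 0 [])
  let cand := (PySem.List.pyRange 0 (szx - 1) 1).flatMap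
    (fun x => ((PySem.List.pyRange 0 (szy - 1) 1).filter
        (fun y => pvCell n x y == ".")).map (fun y => (x, y)))
  pvLoopB n cand

-- ===== PRECONDITION & SPEC =====
-- Pre_ is exactly where the Python A returns: A raises IndexError on empty w (it reads
-- w[0]) and on grids where a scanned cell read n[x][y], or a neighbour read next to a
-- '.' cell, falls outside its (possibly ragged) row; cells only ever change '.' → '#',
-- so the neighbour reads ever performed are exactly those next to initially-'.' cells.
def Pre_deadends (w : List (List String)) : Prop :=
  w ≠ [] ∧
    ∀ x ∈ List.range (w.length - 1), ∀ y ∈ List.range ((w.headD []).length - 1),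
      y < (w.getD x []).length ∧
        ((w.getD x [])[y]? = some "." →
          y + 1 < (w.getD x []).length ∧
          y < (w.getD (x + 1) []).length ∧
          y < (w.getD (if x = 0 then w.length - 1 else x - 1) []).length)
instance (w : List (List String)) : Decidable (Pre_deadends w) := by
  unfold Pre_deadends; infer_instance

def pvWitness_deadends : List (List String) := [["#", "#"], ["#", "."]]

def Spec_deadends (w : List (List String)) (out : List (List String)) : Prop := out = deadends_alt w
instance (w : List (List String)) (out : List (List String)) : Decidable (Spec_deadends w out) := by unfold Spec_deadends; infer_instance

-- ===== CLAIM (what is proved, stated in full; the proofs are below) =====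
def Claim_equal_deadends : Prop := ∀ (w : List (List String)), Dom_deadends w → Pre_deadends w → Spec_deadends w (deadends w)

-- ===== LEMMAS AND PROOFS =====
def pvIsDot (n : List (List String)) (p : Int × Int) : Bool := pvCell n p.1 p.2 == "."

lemma pvCell_nonneg_eq (n : List (List String)) (x y : Int) (hx : 0 ≤ x) (hy : 0 ≤ y) :
    pvCell n x y = if hk : x.toNat < n.length then
        (if hj : y.toNat < (n[x.toNat]).length then n[x.toNat][y.toNat] else "") else "" := by
  simp only [pvCell, PySem.List.pyGetD, PySem.List.pyGet?, PySem.List.pyIdx?, hx, hy, if_pos]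
  by_cases hk : x.toNat < n.length
  · simp only [show x < (n.length : Int) from by omega, if_pos, Option.bind,
      List.getElem?_eq_getElem hk, Option.getD_some, hk, dif_pos]
    by_cases hj : y.toNat < (n[x.toNat] : List String).length
    · simp [show y < ((n[x.toNat] : List String).length : Int) from by omega, hj]
    · simp [show ¬ y < ((n[x.toNat] : List String).length : Int) from by omega, hj]
  · have h0 : ¬ (y < (0:Int)) := by omega
    simp [show ¬ x < (n.length : Int) from by omega, h0, Option.bind, hk]

lemma pvCell_set_self (n : List (List String)) (x y : Int) (hx : 0 ≤ x) (hy : 0 ≤ y)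
    (h : pvCell n x y = ".") (v : String) : pvCell (pvSet n x y v) x y = v := by
  obtain ⟨hk, hj, hdot, hset⟩ := pvCell_dot_spec n x y hx hy h v
  rw [hset, pvCell_nonneg_eq _ _ _ hx hy]
  simp [hk, hj]

lemma pvCell_set_ne (n : List (List String)) (x y a b : Int) (v : String)
    (hx : 0 ≤ x) (hy : 0 ≤ y) (ha : 0 ≤ a) (hb : 0 ≤ b) (hne : (a, b) ≠ (x, y))
    (h : pvCell n x y = ".") :
    pvCell (pvSet n x y v) a b = pvCell n a b := by
  obtain ⟨hk, hj, hdot, hset⟩ := pvCell_dot_spec n x y hx hy h v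
  rw [hset, pvCell_nonneg_eq _ _ _ ha hb, pvCell_nonneg_eq n a b ha hb]
  by_cases hax : a = x
  · have hby : b ≠ y := by rintro rfl; exact hne (by rw [hax])
    subst hax
    have hbj : b.toNat ≠ y.toNat := by omega
    simp only [List.length_set]
    by_cases hka : a.toNat < n.length
    · simp [hka, Ne.symm hbj]
    · simp [hka]
  · have hkx : a.toNat ≠ x.toNat := by omega
    simp only [List.length_set]
    by_cases hka : a.toNat < n.length
    · simp [hka, List.getElem_set_ne (h := fun hh => hkx hh.symm)]
    · simp [hka]

lemma pvCell_set_or (n : List (List String)) (x y : Int) (hx : 0 ≤ x) (hy : 0 ≤ y)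
    (h : pvCell n x y = ".") (a b : Int) (ha : 0 ≤ a) (hb : 0 ≤ b) (v : String) :
    pvCell (pvSet n x y v) a b = v ∨ pvCell (pvSet n x y v) a b = pvCell n a b := by
  by_cases hne : (a, b) = (x, y)
  · simp only [Prod.mk.injEq] at hne
    obtain ⟨rfl, rfl⟩ := hne
    exact Or.inl (pvCell_set_self n a b ha hb h v)
  · exact Or.inr (pvCell_set_ne n x y a b v hx hy ha hb hne h)

lemma pvPass_rel (L : List (Int × Int)) :
    ∀ (n : List (List String)) (done : Bool) (acc : List (Int × Int)),
    L.Nodup → (∀ q ∈ L, 0 ≤ q.1 ∧ 0 ≤ q.2) →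
    (L.foldl pvG (n, done)).1 = ((L.filter (pvIsDot n)).foldl pvStepB (n, acc)).1 ∧
    (L.foldl pvG (n, done)).2
      = (done && (((L.filter (pvIsDot n)).foldl pvStepB (n, acc)).2.length
          == acc.length + (L.filter (pvIsDot n)).length)) ∧
    ((L.filter (pvIsDot n)).foldl pvStepB (n, acc)).2
      = acc ++ (L.filter (pvIsDot n)).filter (pvIsDot (L.foldl pvG (n, done)).1) ∧
    (∀ q : Int × Int, 0 ≤ q.1 → 0 ≤ q.2 → q ∉ L →
        pvCell (L.foldl pvG (n, done)).1 q.1 q.2 = pvCell n q.1 q.2) ∧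
    (∀ q : Int × Int, 0 ≤ q.1 → 0 ≤ q.2 →
        pvIsDot (L.foldl pvG (n, done)).1 q = true → pvIsDot n q = true) := by
  induction L with
  | nil =>
    intro n done acc _ _
    refine ⟨rfl, by simp, by simp, fun q _ _ _ => rfl, fun q _ _ h => h⟩
  | cons a L ih =>
    intro n done acc hnd hnn
    obtain ⟨ha1, ha2⟩ := hnn a (List.mem_cons_self ..)
    have haL : a ∉ L := (List.nodup_cons.mp hnd).1
    have hndL : L.Nodup := (List.nodup_cons.mp hnd).2
    have hnnL : ∀ q ∈ L, 0 ≤ q.1 ∧ 0 ≤ q.2 := fun q hq => hnn q (List.mem_cons_of_mem _ hq)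
    by_cases hdot : pvIsDot n a = true
    · have hdot' : pvCell n a.1 a.2 = "." := by simpa [pvIsDot] using hdot
      rw [List.filter_cons_of_pos hdot]
      by_cases hct : (pvCt n a.1 a.2 == 3) = true
      · -- the head cell flips
        have hstepA : pvG (n, done) a = (pvSet n a.1 a.2 "#", false) := by
          unfold pvG pvStepA; simp only; rw [if_pos (by simpa [pvIsDot] using hdot), if_pos hct]
        have hstepB : pvStepB (n, acc) a = (pvSet n a.1 a.2 "#", acc) := by
          unfold pvStepB; simp only; rw [if_pos hct]
        rw [List.foldl_cons, List.foldl_cons, hstepA, hstepB]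
        set n₁ := pvSet n a.1 a.2 "#" with hn₁
        have hfilt : L.filter (pvIsDot n₁) = L.filter (pvIsDot n) := by
          apply List.filter_congr
          intro q hq
          have hqnn := hnnL q hq
          have hqa : (q.1, q.2) ≠ (a.1, a.2) := by
            intro hh
            exact haL (by
              have : q = a := Prod.ext (congrArg Prod.fst hh) (congrArg Prod.snd hh)
              exact this ▸ hq)
          unfold pvIsDot
          rw [hn₁, pvCell_set_ne n a.1 a.2 q.1 q.2 "#" ha1 ha2 hqnn.1 hqnn.2 hqa hdot']
        obtain ⟨c1, c2, c3, c4, c5⟩ := ih n₁ false acc hndL hnnL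
        rw [hfilt] at c1 c2 c3
        have hAdotFalse : pvIsDot (L.foldl pvG (n₁, false)).1 a = false := by
          by_contra hcon
          have : pvIsDot (L.foldl pvG (n₁, false)).1 a = true := by
            revert hcon; cases (pvIsDot (L.foldl pvG (n₁, false)).1 a) <;> simp
          have h5 := c5 a ha1 ha2 this
          unfold pvIsDot at h5
          rw [hn₁, pvCell_set_self n a.1 a.2 ha1 ha2 hdot' "#"] at h5
          simp at h5
        have hlen : ((L.filter (pvIsDot n)).foldl pvStepB (n₁, acc)).2.length
            ≠ acc.length + (a :: L.filter (pvIsDot n)).length := by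
          rw [c3]
          have := List.length_filter_le (pvIsDot (L.foldl pvG (n₁, false)).1) (L.filter (pvIsDot n))
          simp only [List.length_append, List.length_cons]
          omega
        refine ⟨c1, ?_, ?_, ?_, ?_⟩
        · rw [c2]
          have hX : (((L.filter (pvIsDot n)).foldl pvStepB (n₁, acc)).2.length
              == acc.length + (a :: L.filter (pvIsDot n)).length) = false := by
            simpa using hlen
          rw [hX, Bool.false_and, Bool.and_false]
        · rw [List.filter_cons_of_neg (by simp [hAdotFalse]), c3]
        · intro q h1 h2 hq
          rw [c4 q h1 h2 (fun hm => hq (List.mem_cons_of_mem _ hm)), hn₁,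
            pvCell_set_ne n a.1 a.2 q.1 q.2 "#" ha1 ha2 h1 h2
              (by
                intro hh
                exact hq (by
                  have : q = a := Prod.ext (congrArg Prod.fst hh) (congrArg Prod.snd hh)
                  exact this ▸ List.mem_cons_self ..)) hdot']
        · intro q h1 h2 hq
          have h5 := c5 q h1 h2 hq
          unfold pvIsDot at h5 ⊢
          rcases pvCell_set_or n a.1 a.2 ha1 ha2 hdot' q.1 q.2 h1 h2 "#" with hor | hor
          · rw [hn₁] at h5; rw [hor] at h5; simp at h5
          · rw [hn₁] at h5; rw [hor] at h5; exact h5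
      · -- the head cell stays: A keeps the state, B appends it to nxt
        have hstepA : pvG (n, done) a = (n, done) := by
          unfold pvG pvStepA; simp only; rw [if_pos (by simpa [pvIsDot] using hdot), if_neg hct]
        have hstepB : pvStepB (n, acc) a = (n, acc ++ [a]) := by
          unfold pvStepB; simp only; rw [if_neg hct]
        rw [List.foldl_cons, List.foldl_cons, hstepA, hstepB]
        obtain ⟨c1, c2, c3, c4, c5⟩ := ih n done (acc ++ [a]) hndL hnnL
        have hAdotTrue : pvIsDot (L.foldl pvG (n, done)).1 a = true := by
          unfold pvIsDot
          rw [c4 a ha1 ha2 haL]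
          exact hdot
        refine ⟨c1, ?_, ?_,
          fun q h1 h2 hq => c4 q h1 h2 (fun hm => hq (List.mem_cons_of_mem _ hm)), c5⟩
        · rw [c2]
          have : (acc ++ [a]).length + (L.filter (pvIsDot n)).length
              = acc.length + (a :: L.filter (pvIsDot n)).length := by
            simp only [List.length_append, List.length_cons, List.length_nil]; omega
          rw [this]
        · rw [List.filter_cons_of_pos hAdotTrue, c3, List.append_assoc, List.singleton_append]
    · -- head not a dot: A's guard fails, B's worklist never contained it
      have hstepA : pvG (n, done) a = (n, done) := by
        unfold pvG pvStepA; simp only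
        rw [if_neg (by simpa [pvIsDot] using hdot)]
      rw [List.foldl_cons, hstepA, List.filter_cons_of_neg (by simpa using hdot)]
      obtain ⟨c1, c2, c3, c4, c5⟩ := ih n done acc hndL hnnL
      exact ⟨c1, c2, c3,
        fun q h1 h2 hq => c4 q h1 h2 (fun hm => hq (List.mem_cons_of_mem _ hm)), c5⟩

lemma pvPairs_nodup (szx szy : Int) : (pvPairs szx szy).Nodup := by
  have : pvPairs szx szy
      = (PySem.List.pyRange 0 (szx - 1) 1) ×ˢ (PySem.List.pyRange 0 (szy - 1) 1) := rfl
  rw [this]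
  exact List.Nodup.product (PySem.List.nodup_pyRange_one ..) (PySem.List.nodup_pyRange_one ..)

lemma pvLoop_rel_nil (szx szy : Int) (n : List (List String))
    (hcand : (pvPairs szx szy).filter (pvIsDot n) = []) :
    pvLoopA szx szy n = n := by
  have c := pvPass_rel (pvPairs szx szy) n true []
    (pvPairs_nodup szx szy) (pvPairs_nonneg szx szy)
  rw [hcand] at c
  obtain ⟨c1, c2, -, -, -⟩ := c
  simp only [List.foldl_nil, List.length_nil] at c1 c2
  rw [pvLoopA]
  rw [dif_pos (by rw [pvSweepA_eq_foldG, c2]; simp)]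
  rw [pvSweepA_eq_foldG, c1]

lemma pvLoop_rel (szx szy : Int) (N : Nat) :
    ∀ (n : List (List String)) (cand : List (Int × Int)), cand.length ≤ N →
      cand = (pvPairs szx szy).filter (pvIsDot n) →
      pvLoopA szx szy n = pvLoopB n cand := by
  induction N with
  | zero =>
    intro n cand hlen hcand
    have hc : cand = [] := by
      cases cand with
      | nil => rfl
      | cons a l => simp at hlen
    subst hc
    rw [pvLoopB]
    simp only [List.isEmpty_nil, if_true]
    exact pvLoop_rel_nil szx szy n hcand.symm
  | succ N ih =>
    intro n cand hlen hcand
    by_cases hc : cand = []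
    · subst hc
      rw [pvLoopB]
      simp only [List.isEmpty_nil, if_true]
      exact pvLoop_rel_nil szx szy n hcand.symm
    · have c := pvPass_rel (pvPairs szx szy) n true []
        (pvPairs_nodup szx szy) (pvPairs_nonneg szx szy)
      rw [← hcand] at c
      obtain ⟨c1, c2, c3, -, c5⟩ := c
      simp only [List.length_nil, List.nil_append, Nat.zero_add] at c1 c2 c3
      rw [pvLoopA, pvLoopB, if_neg (by simp [hc])]
      by_cases hlen2 : ((cand.foldl pvStepB (n, [])).2).length = cand.length
      · rw [dif_pos hlen2, dif_pos (by rw [pvSweepA_eq_foldG, c2, hlen2]; simp)]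
        rw [pvSweepA_eq_foldG, c1]
      · rw [dif_neg hlen2, dif_neg (by rw [pvSweepA_eq_foldG, c2]; simp [hlen2])]
        rw [pvSweepA_eq_foldG, c1]
        have hB2 : (cand.foldl pvStepB (n, [])).2
            = (pvPairs szx szy).filter (pvIsDot ((pvPairs szx szy).foldl pvG (n, true)).1) := by
          rw [c3, hcand, List.filter_filter]
          apply List.filter_congr
          intro q hq
          have hqnn := pvPairs_nonneg szx szy q hq
          cases hA : pvIsDot ((pvPairs szx szy).foldl pvG (n, true)).1 q
          · simp
          · simp [c5 q hqnn.1 hqnn.2 hA]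
        apply ih
        · have h1 := List.length_filter_le
            (pvIsDot ((pvPairs szx szy).foldl pvG (n, true)).1) cand
          rw [c3] at hlen2 ⊢
          omega
        · rw [hB2, c1]

lemma pvCand_eq (szx szy : Int) (n : List (List String)) :
    ((PySem.List.pyRange 0 (szx - 1) 1).flatMap
      (fun x => ((PySem.List.pyRange 0 (szy - 1) 1).filter
          (fun y => pvCell n x y == ".")).map (fun y => (x, y))))
      = (pvPairs szx szy).filter (pvIsDot n) := by
  simp only [pvPairs, List.filter_flatMap, List.filter_map]
  rfl

-- ===== VERDICT (by name: the statement is the Claim_ definition above) =====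
theorem deadends_spec : Claim_equal_deadends := by
  intro w _ _
  unfold Spec_deadends deadends deadends_alt
  simp only
  rw [List.map_id', show (w.map fun g => g.map fun a => a) = w from by simp]
  rw [pvCand_eq]
  exact pvLoop_rel _ _ _ w _ le_rfl rfl
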